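-- pv_equiv track=rewrite | github.com/AI4quantum/qiskit-gym | src/qiskit_gym/envs/routing.py | _build_dist_pairs
-- ===== SOURCE A (Python) =====
-- from collections import defaultdict
-- from typing import Iterable, List, Sequence, Tuple
--
-- def _build_dist_pairs(dists: List[List[int]]) -> tuple[dict[int, list[tuple[int, int]]], list[int]]:
--     dist_pairs = defaultdict(list)
--     num_qubits = len(dists)
--     for q1 in range(num_qubits):
--         for q2 in range(q1 + 1, num_qubits):
--             dist_pairs[dists[q1][q2]].append((q1, q2))
--     all_dists = sorted(dist_pairs.keys())
--     return dist_pairs, all_dists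
-- ===== SOURCE B (Python) =====
-- from collections import defaultdict
--
-- def _build_dist_pairs(dists):
--     n = len(dists)
--     # flatten all pairs once, then group by per-key scans over the flat list
--     flat = [(dists[q1][q2], (q1, q2)) for q1 in range(n) for q2 in range(q1 + 1, n)]
--     keys = list(dict.fromkeys(d for d, _ in flat))
--     dist_pairs = defaultdict(list)
--     for k in keys:
--         dist_pairs[k] = [p for d, p in flat if d == k]
--     return dist_pairs, sorted(keys)
-- ===== Notes on version B (the rewrite author's own statement) =====
-- stated objective: alternative
-- what changed: Replaces A's nested loops that append each pair into a defaultdict (then sort the keys) by: flatten all (dist, pair) tuples once, dedup the distances in first-appearance order, and build each group with one scan of the flat list per distinct distance.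
import Mathlib
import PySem

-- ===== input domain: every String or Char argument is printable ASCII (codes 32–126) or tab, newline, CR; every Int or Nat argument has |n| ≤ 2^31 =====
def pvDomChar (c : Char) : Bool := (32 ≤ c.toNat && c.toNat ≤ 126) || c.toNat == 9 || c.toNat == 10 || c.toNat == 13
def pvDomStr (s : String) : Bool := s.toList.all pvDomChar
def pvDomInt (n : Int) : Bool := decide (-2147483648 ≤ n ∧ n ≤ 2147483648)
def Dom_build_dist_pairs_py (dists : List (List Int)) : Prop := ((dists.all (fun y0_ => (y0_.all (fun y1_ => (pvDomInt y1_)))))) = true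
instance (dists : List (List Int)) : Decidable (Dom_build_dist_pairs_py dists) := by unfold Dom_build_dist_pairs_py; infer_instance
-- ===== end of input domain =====

-- B replaces A's grouping-into-a-defaultdict double loop by: flatten all pairs once,
-- dedup the distances in first-appearance order, then build each group by one scan per
-- distinct distance (objective: alternative decomposition, same result).

-- ===== PORT A =====
-- Indexing dists[q1][q2] uses pyGetD; exact under Pre_ (both indices nonnegative and in range).
def build_dist_pairs_py (dists : List (List Int)) : (List (Int × List (Int × Int))) × List Int :=
  let n : Int := (dists.length : Int)
  let dp : PySem.Dict Int (List (Int × Int)) :=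
    (PySem.List.pyRange 0 n 1).foldl (fun d q1 =>
      (PySem.List.pyRange (q1 + 1) n 1).foldl (fun d q2 =>
        d.modify (PySem.List.pyGetD (PySem.List.pyGetD dists q1 []) q2 0) [] (· ++ [(q1, q2)])) d)
      PySem.Dict.empty
  (dp.items, PySem.List.sorted dp.keys id false)

-- ===== PORT B =====
def build_dist_pairs_py_alt (dists : List (List Int)) : (List (Int × List (Int × Int))) × List Int :=
  let n : Int := (dists.length : Int)
  let flat : List (Int × (Int × Int)) :=
    (PySem.List.pyRange 0 n 1).flatMap (fun q1 =>
      (PySem.List.pyRange (q1 + 1) n 1).map (fun q2 =>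
        (PySem.List.pyGetD (PySem.List.pyGetD dists q1 []) q2 0, (q1, q2))))
  let keys : List Int := PySem.List.dedup (flat.map (·.1))
  let groups : List (Int × List (Int × Int)) :=
    keys.map (fun k => (k, (flat.filter (fun p => p.1 == k)).map (·.2)))
  (groups, PySem.List.sorted keys id false)

-- ===== PRECONDITION & SPEC =====
-- Python A raises IndexError when a row other than the last is shorter than the matrix
-- (dists[q1][q2] with q2 up to len(dists)-1); Pre_ excludes exactly those inputs.
def Pre_build_dist_pairs_py (dists : List (List Int)) : Prop :=
  ∀ i < dists.length - 1, dists.length ≤ (dists.getD i []).length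
instance (dists : List (List Int)) : Decidable (Pre_build_dist_pairs_py dists) := by
  unfold Pre_build_dist_pairs_py; infer_instance
def pvWitness_build_dist_pairs_py : List (List Int) := [[0, 1, 2], [1, 0, 1], [2, 1, 0]]
def Spec_build_dist_pairs_py (dists : List (List Int)) (out : (List (Int × List (Int × Int))) × List Int) : Prop := out = build_dist_pairs_py_alt dists
instance (dists : List (List Int)) (out : (List (Int × List (Int × Int))) × List Int) : Decidable (Spec_build_dist_pairs_py dists out) := by unfold Spec_build_dist_pairs_py; infer_instance

-- ===== CLAIM (what is proved, stated in full; the proofs are below) =====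
def Claim_equal_build_dist_pairs_py : Prop := ∀ (dists : List (List Int)), Dom_build_dist_pairs_py dists → Pre_build_dist_pairs_py dists → Spec_build_dist_pairs_py dists (build_dist_pairs_py dists)

-- ===== LEMMAS AND PROOFS =====

-- A's nested grouping loop is the flat grouping loop over the flattened (dist, pair) list.
theorem pv_nested_eq_flat (key : Int → Int → Int) (l : List Int) (g : Int → List Int)
    (d : PySem.Dict Int (List (Int × Int))) :
    l.foldl (fun d q1 => (g q1).foldl
        (fun d q2 => d.modify (key q1 q2) [] (· ++ [(q1, q2)])) d) d
      = (l.flatMap (fun q1 => (g q1).map (fun q2 => (key q1 q2, (q1, q2))))).foldl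
          (fun d p => d.modify p.1 [] (· ++ [p.2])) d := by
  induction l generalizing d with
  | nil => rfl
  | cons a l ih => simp [List.foldl_append, List.foldl_map, ih]

theorem pv_keys (flat : List (Int × (Int × Int))) :
    (flat.foldl (fun d p => d.modify p.1 [] (· ++ [p.2])) PySem.Dict.empty).keys
      = PySem.List.dedup (flat.map (·.1)) := by
  have := PySem.Dict.keys_foldl_modify_key flat (·.1) ([] : List (Int × Int))
    (fun _ p => (· ++ [p.2])) PySem.Dict.empty
  simpa [PySem.Dict.keys_empty, PySem.Set.update_nil_left, PySem.List.dedup_eq_ofList] using this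

theorem pv_items (flat : List (Int × (Int × Int))) :
    (flat.foldl (fun d p => d.modify p.1 [] (· ++ [p.2])) PySem.Dict.empty).items
      = (PySem.List.dedup (flat.map (·.1))).map
          (fun k => (k, (flat.filter (fun p => p.1 == k)).map (·.2))) := by
  have hnodup : (flat.foldl (fun d p => d.modify p.1 [] (· ++ [p.2])) PySem.Dict.empty).keys.Nodup :=
    PySem.Dict.nodup_keys_foldl_modify_key flat (·.1) ([] : List (Int × Int))
      (fun _ p => (· ++ [p.2])) PySem.Dict.empty PySem.Dict.nodup_keys_empty
  rw [PySem.Dict.items_eq_map_keys _ hnodup ([] : List (Int × Int)), pv_keys]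
  refine List.map_congr_left (fun k _ => ?_)
  simpa [PySem.Dict.getD_empty] using
    congrArg (fun v => (k, v)) (PySem.Dict.getD_foldl_modify_append flat PySem.Dict.empty k)

theorem build_dist_pairs_py_eq_alt (dists : List (List Int)) :
    build_dist_pairs_py dists = build_dist_pairs_py_alt dists := by
  unfold build_dist_pairs_py build_dist_pairs_py_alt
  simp only []
  rw [pv_nested_eq_flat (fun q1 q2 => PySem.List.pyGetD (PySem.List.pyGetD dists q1 []) q2 0)
        (PySem.List.pyRange 0 (dists.length : Int) 1)
        (fun q1 => PySem.List.pyRange (q1 + 1) (dists.length : Int) 1) PySem.Dict.empty,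
      pv_items, pv_keys]

-- ===== VERDICT (by name: the statement is the Claim_ definition above) =====
theorem build_dist_pairs_py_spec : Claim_equal_build_dist_pairs_py := by
  intro dists _ _
  unfold Spec_build_dist_pairs_py
  exact build_dist_pairs_py_eq_alt dists
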